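-- pv_equiv track=rewrite | github.com/ura-hcmut/BARTBahnar | translation/utils/reconstruct_sentence.py | reconstruct_sentence_batch
-- ===== SOURCE A (Python) =====
-- def reconstruct_sentence_batch(processed_results, non_foreign_words):
--     """
--     Reassemble a sentence from processed tokens in order.
--     Replaces <word> placeholders with words from non_foreign_words.
--     Capitalizes the start of the sentence and after periods.
--     """
--     reconstructed_sentence = []
--     non_foreign_index = 0
--     capitalize_next = True  # Flag to track when to capitalize
--
--     # Reassemble sentence from processed_results and non_foreign_words in order
--     for word in processed_results:
--         # If the word is <word>, replace it with the next entry from non_foreign_words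
--         if word == '<word>':
--             if non_foreign_index < len(non_foreign_words):
--                 reconstructed_sentence.append(non_foreign_words[non_foreign_index])
--                 non_foreign_index += 1
--             else:
--                 reconstructed_sentence.append(word)
--         else:
--             # Capitalize if at the start of a sentence
--             if capitalize_next:
--                 reconstructed_sentence.append(word.capitalize())  # Capitalize first letter
--                 capitalize_next = False  # After capitalizing, revert to lowercase
--             else:
--                 reconstructed_sentence.append(word.lower())  # Lowercase remaining words
--
--         # Update capitalize flag after a period
--         if word.endswith('.'):
--             capitalize_next = True
--
--     # Join tokens into a single string
--     reconstructed_sentence = " ".join(reconstructed_sentence).strip()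
--
--     # Ensure sentence starts with a capital letter and ends with a period
--     if reconstructed_sentence:
--         if not reconstructed_sentence[0].isupper():
--             reconstructed_sentence = reconstructed_sentence[0].capitalize() + reconstructed_sentence[1:]
--         if not reconstructed_sentence.endswith('.'):
--             reconstructed_sentence += '.'
--
--     return reconstructed_sentence
-- ===== SOURCE B (Python) =====
-- def reconstruct_sentence_batch(processed_results, non_foreign_words):
--     """Same result as A; different decomposition: pass 1 substitutes placeholders
--     (consuming words front-to-back), pass 2 does the case folding, then the fixups."""
--     # pass 1: substitution only; tag substituted/placeholder tokens so pass 2 leaves them alone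
--     words = iter(non_foreign_words)
--     pieces = []
--     for tok in processed_results:
--         if tok == '<word>':
--             pieces.append((next(words, tok), True))
--         else:
--             pieces.append((tok, False))
--     # pass 2: case folding driven by a capitalize flag
--     out = []
--     cap = True
--     for w, skip in pieces:
--         if skip:
--             out.append(w)
--         elif cap:
--             out.append(w.capitalize())
--             cap = False
--         else:
--             out.append(w.lower())
--         if not skip and w.endswith('.'):
--             cap = True
--     s = ' '.join(out).strip()
--     if s and not s[0].isupper():
--         s = s[0].upper() + s[1:]
--     if s and not s.endswith('.'):
--         s += '.'
--     return s
-- ===== Notes on version B (the rewrite author's own statement) =====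
-- stated objective: alternative
-- what changed: A's single loop threading an index into non_foreign_words together with the capitalize flag is split into two independent passes: pass 1 substitutes placeholders by consuming the word list front-to-back and tags substituted tokens, pass 2 does the case folding from the tags alone; the final fixups are kept.
import Mathlib
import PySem

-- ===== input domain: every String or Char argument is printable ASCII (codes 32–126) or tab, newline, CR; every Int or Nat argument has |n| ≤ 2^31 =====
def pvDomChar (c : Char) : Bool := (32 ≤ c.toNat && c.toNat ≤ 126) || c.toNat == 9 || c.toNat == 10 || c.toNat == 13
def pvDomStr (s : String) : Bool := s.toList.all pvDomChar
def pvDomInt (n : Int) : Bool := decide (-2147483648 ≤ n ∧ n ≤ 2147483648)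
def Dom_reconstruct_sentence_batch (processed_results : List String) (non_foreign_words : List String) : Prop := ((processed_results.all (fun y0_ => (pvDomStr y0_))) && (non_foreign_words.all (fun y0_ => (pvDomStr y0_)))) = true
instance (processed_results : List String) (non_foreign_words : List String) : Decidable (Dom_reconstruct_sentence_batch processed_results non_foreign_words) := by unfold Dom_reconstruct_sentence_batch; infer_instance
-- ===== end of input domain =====

-- B replaces A's single loop (index counter + capitalize flag) by two passes — substitution
-- consuming the word list, then case folding — for a plainer decomposition (objective: simpler).

-- Python str.capitalize: first char upper-cased, rest lower-cased (exact on the ASCII domain,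
-- where title-casing a char equals upper-casing it)
def pvCapChars (cs : List Char) : List Char :=
  match cs with
  | [] => []
  | c :: rest => PySem.Chars.upperChar c :: PySem.Chars.lower rest

def pvCap (s : String) : String := String.ofList (pvCapChars s.toList)

-- ===== PORT A =====
-- one fold over processed_results carrying (output list, index into non_foreign_words, capitalize flag)
def pvStepA (non_foreign_words : List String) (st : List String × Nat × Bool) (word : String) :
    List String × Nat × Bool :=
  let acc := st.1
  let idx := st.2.1
  let cap := st.2.2
  let st' :=
    if word == "<word>" then
      if idx < non_foreign_words.length then
        (acc ++ [non_foreign_words.getD idx ""], idx + 1, cap)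
      else (acc ++ [word], idx, cap)
    else
      if cap then (acc ++ [pvCap word], idx, false)
      else (acc ++ [PySem.Str.lower word], idx, cap)
  if PySem.Str.endswith word "." then (st'.1, st'.2.1, true) else st'

-- A's trailing fixups: "if reconstructed_sentence: if not s[0].isupper(): …; if not s.endswith('.'): …"
def pvTailA (cs : List Char) : List Char :=
  match cs with
  | [] => []
  | c :: rest =>
    let cs1 := if !PySem.Chars.isupper c then pvCapChars [c] ++ rest else c :: rest
    if !PySem.Chars.endswith cs1 ['.'] then cs1 ++ ['.'] else cs1

def reconstruct_sentence_batch (processed_results : List String) (non_foreign_words : List String) : String :=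
  String.ofList (pvTailA (PySem.Str.strip (PySem.Str.join " "
    (processed_results.foldl (pvStepA non_foreign_words) ([], 0, true)).1)).toList)

-- ===== PORT B =====
-- pass 1: substitution only, consuming non_foreign_words front-to-back; tags substituted tokens
def pvStepB1 (st : List (String × Bool) × List String) (tok : String) :
    List (String × Bool) × List String :=
  if tok == "<word>" then
    match st.2 with
    | w :: ws => (st.1 ++ [(w, true)], ws)
    | [] => (st.1 ++ [(tok, true)], [])
  else (st.1 ++ [(tok, false)], st.2)

-- pass 2: case folding driven by the capitalize flag; tagged tokens pass through untouched
def pvStepB2 (st : List String × Bool) (p : String × Bool) : List String × Bool :=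
  let out :=
    if p.2 then st.1 ++ [p.1]
    else if st.2 then st.1 ++ [pvCap p.1]
    else st.1 ++ [PySem.Str.lower p.1]
  let cap := if p.2 then st.2 else false
  let cap := if p.2 = false ∧ PySem.Str.endswith p.1 "." = true then true else cap
  (out, cap)

-- B's trailing fixups: "if s and not s[0].isupper(): …; if s and not s.endswith('.'): …"
def pvTailB (cs : List Char) : List Char :=
  let cs1 :=
    match cs with
    | [] => ([] : List Char)
    | c :: rest => if !PySem.Chars.isupper c then PySem.Chars.upperChar c :: rest else c :: rest
  if cs1.isEmpty = false ∧ PySem.Chars.endswith cs1 ['.'] = false then cs1 ++ ['.'] else cs1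

def reconstruct_sentence_batch_alt (processed_results : List String) (non_foreign_words : List String) : String :=
  String.ofList (pvTailB (PySem.Str.strip (PySem.Str.join " "
    ((processed_results.foldl pvStepB1 ([], non_foreign_words)).1.foldl pvStepB2 ([], true)).1)).toList)

-- ===== PRECONDITION & SPEC =====
def Spec_reconstruct_sentence_batch (processed_results : List String) (non_foreign_words : List String) (out : String) : Prop := out = reconstruct_sentence_batch_alt processed_results non_foreign_words
instance (processed_results : List String) (non_foreign_words : List String) (out : String) : Decidable (Spec_reconstruct_sentence_batch processed_results non_foreign_words out) := by unfold Spec_reconstruct_sentence_batch; infer_instance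

-- ===== CLAIM (what is proved, stated in full; the proofs are below) =====
def Claim_equal_reconstruct_sentence_batch : Prop := ∀ (processed_results : List String) (non_foreign_words : List String), Dom_reconstruct_sentence_batch processed_results non_foreign_words → Spec_reconstruct_sentence_batch processed_results non_foreign_words (reconstruct_sentence_batch processed_results non_foreign_words)

-- ===== LEMMAS AND PROOFS =====

-- the common shape of both token streams
def pvSpine : List String → List String → Bool → List String
  | [], _, _ => []
  | tok :: rest, ws, cap =>
    if tok == "<word>" then
      match ws with
      | w :: ws' => w :: pvSpine rest ws' cap
      | [] => tok :: pvSpine rest [] cap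
    else
      (if cap then pvCap tok else PySem.Str.lower tok) :: pvSpine rest ws (PySem.Str.endswith tok ".")

def pvPairs : List String → List String → List (String × Bool)
  | [], _ => []
  | tok :: rest, ws =>
    if tok == "<word>" then
      match ws with
      | w :: ws' => (w, true) :: pvPairs rest ws'
      | [] => (tok, true) :: pvPairs rest []
    else (tok, false) :: pvPairs rest ws

def pvFold : List (String × Bool) → Bool → List String
  | [], _ => []
  | p :: rest, cap =>
    if p.2 then p.1 :: pvFold rest cap
    else (if cap then pvCap p.1 else PySem.Str.lower p.1) :: pvFold rest (PySem.Str.endswith p.1 ".")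

lemma pvSpine_word_hit (rest : List String) (w : String) (ws' : List String) (cap : Bool) :
    pvSpine ("<word>" :: rest) (w :: ws') cap = w :: pvSpine rest ws' cap := rfl

lemma pvSpine_word_miss (rest : List String) (cap : Bool) :
    pvSpine ("<word>" :: rest) [] cap = "<word>" :: pvSpine rest [] cap := rfl

lemma pv_word_not_period :
    PySem.Chars.endswith ['<', 'w', 'o', 'r', 'd', '>'] ['.'] = false := by decide

lemma pvA_loop (pr : List String) (nfw : List String) :
    ∀ (acc : List String) (idx : Nat) (cap : Bool), idx ≤ nfw.length →
      (pr.foldl (pvStepA nfw) (acc, idx, cap)).1 = acc ++ pvSpine pr (nfw.drop idx) cap := by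
  induction pr with
  | nil => intro acc idx cap _; simp [pvSpine]
  | cons tok rest ih =>
    intro acc idx cap hidx
    by_cases hw : tok = "<word>"
    · subst hw
      by_cases hlt : idx < nfw.length
      · have hdrop : nfw.drop idx = nfw[idx] :: nfw.drop (idx + 1) :=
          List.drop_eq_getElem_cons hlt
        have hstep : pvStepA nfw (acc, idx, cap) "<word>"
            = (acc ++ [nfw[idx]], idx + 1, cap) := by
          simp [pvStepA, hlt, pv_word_not_period]
        rw [List.foldl_cons, hstep, ih _ _ _ (by omega), hdrop, pvSpine_word_hit]
        simp
      · have hdrop : nfw.drop idx = [] := List.drop_eq_nil_of_le (by omega)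
        have hstep : pvStepA nfw (acc, idx, cap) "<word>"
            = (acc ++ ["<word>"], idx, cap) := by
          simp [pvStepA, hlt, pv_word_not_period]
        rw [List.foldl_cons, hstep, ih _ _ _ hidx, hdrop, pvSpine_word_miss]
        simp
    · have hbeq : (tok == "<word>") = false := beq_eq_false_iff_ne.mpr hw
      have hstep : pvStepA nfw (acc, idx, cap) tok
          = (acc ++ [if cap then pvCap tok else PySem.Str.lower tok], idx,
             PySem.Str.endswith tok ".") := by
        cases cap <;> cases hp : PySem.Chars.endswith tok.toList ['.'] <;>
          simp [pvStepA, hbeq, hp]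
      rw [List.foldl_cons, hstep, ih _ _ _ hidx]
      simp [pvSpine, hbeq]

lemma pvB1_loop (pr : List String) :
    ∀ (acc : List (String × Bool)) (ws : List String),
      (pr.foldl pvStepB1 (acc, ws)).1 = acc ++ pvPairs pr ws := by
  induction pr with
  | nil => intro acc ws; simp [pvPairs]
  | cons tok rest ih =>
    intro acc ws
    by_cases hw : (tok == "<word>") = true
    · cases ws with
      | nil =>
        have hstep : pvStepB1 (acc, []) tok = (acc ++ [(tok, true)], []) := by
          simp [pvStepB1, hw]
        rw [List.foldl_cons, hstep, ih]
        simp [pvPairs, hw]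
      | cons w ws' =>
        have hstep : pvStepB1 (acc, w :: ws') tok = (acc ++ [(w, true)], ws') := by
          simp [pvStepB1, hw]
        rw [List.foldl_cons, hstep, ih]
        simp [pvPairs, hw]
    · have hstep : pvStepB1 (acc, ws) tok = (acc ++ [(tok, false)], ws) := by
        simp [pvStepB1, hw]
      rw [List.foldl_cons, hstep, ih]
      simp [pvPairs, hw]

lemma pvB2_loop (ps : List (String × Bool)) :
    ∀ (acc : List String) (cap : Bool),
      (ps.foldl pvStepB2 (acc, cap)).1 = acc ++ pvFold ps cap := by
  induction ps with
  | nil => intro acc cap; simp [pvFold]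
  | cons p rest ih =>
    intro acc cap
    obtain ⟨w, skip⟩ := p
    cases skip
    · have hstep : pvStepB2 (acc, cap) (w, false)
          = (acc ++ [if cap then pvCap w else PySem.Str.lower w],
             PySem.Str.endswith w ".") := by
        cases cap <;> cases hp : PySem.Chars.endswith w.toList ['.'] <;> simp [pvStepB2, hp]
      rw [List.foldl_cons, hstep, ih]
      simp [pvFold]
    · have hstep : pvStepB2 (acc, cap) (w, true) = (acc ++ [w], cap) := by
        simp [pvStepB2]
      rw [List.foldl_cons, hstep, ih]
      simp [pvFold]

lemma pvFold_pairs (pr : List String) :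
    ∀ (ws : List String) (cap : Bool), pvFold (pvPairs pr ws) cap = pvSpine pr ws cap := by
  induction pr with
  | nil => intro ws cap; simp [pvPairs, pvSpine, pvFold]
  | cons tok rest ih =>
    intro ws cap
    by_cases hw : (tok == "<word>") = true
    · cases ws with
      | nil => simp [pvPairs, pvSpine, pvFold, hw, ih]
      | cons w ws' => simp [pvPairs, pvSpine, pvFold, hw, ih]
    · simp [pvPairs, pvSpine, pvFold, hw, ih]

lemma pvTail_eq (cs : List Char) : pvTailA cs = pvTailB cs := by
  cases cs with
  | nil => simp [pvTailA, pvTailB]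
  | cons c rest =>
    simp only [pvTailA, pvTailB, pvCapChars, PySem.Chars.lower]
    by_cases hu : PySem.Chars.isupper c = true
    · simp [hu]
    · have hu' : PySem.Chars.isupper c = false := by simpa using hu
      simp [hu']

theorem pv_main (pr nfw : List String) :
    reconstruct_sentence_batch pr nfw = reconstruct_sentence_batch_alt pr nfw := by
  unfold reconstruct_sentence_batch reconstruct_sentence_batch_alt
  rw [pvA_loop pr nfw [] 0 true (by omega), pvB1_loop pr [] nfw, pvB2_loop _ [] true]
  simp only [List.nil_append, List.drop_zero]
  rw [pvFold_pairs, pvTail_eq]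

-- ===== VERDICT (by name: the statement is the Claim_ definition above) =====
theorem reconstruct_sentence_batch_spec : Claim_equal_reconstruct_sentence_batch := by
  intro pr nfw _
  unfold Spec_reconstruct_sentence_batch
  exact pv_main pr nfw
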